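-- pv_equiv track=rewrite | github.com/kaizheng9000/Leet-Code | Maximum Number of Balloons/MaximumNumberofBalloonsSolution.py | count_balloons
-- ===== SOURCE A (Python) =====
-- def count_balloons(letters):
--     letter_count = { "b":0, "a":0, "l":0, "o":0, "n":0}
--     balloon_count = 0
--     keep_spelling = True
--
--     for letter in letters:
--         if letter in letter_count:
--             letter_count[letter] += 1
--
--     while keep_spelling:
--         for char in "balloon":
--             if letter_count[char] < 1:
--                 keep_spelling = False
--                 break
--             else:
--                 if char == "n":
--                     balloon_count += 1
--                 letter_count[char] -= 1
--
--     return balloon_count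
-- ===== SOURCE B (Python) =====
-- def count_balloons(letters):
--     counts = {}
--     for ch in letters:
--         counts[ch] = counts.get(ch, 0) + 1
--     return min(counts.get('b', 0), counts.get('a', 0),
--                counts.get('l', 0) // 2, counts.get('o', 0) // 2,
--                counts.get('n', 0))
-- ===== Notes on version B (the rewrite author's own statement) =====
-- stated objective: simpler
-- what changed: Replaces A's repeated-subtraction while-loop that simulates spelling the word over and over with a single tally pass and the closed form min(b, a, l//2, o//2, n).
import Mathlib
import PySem

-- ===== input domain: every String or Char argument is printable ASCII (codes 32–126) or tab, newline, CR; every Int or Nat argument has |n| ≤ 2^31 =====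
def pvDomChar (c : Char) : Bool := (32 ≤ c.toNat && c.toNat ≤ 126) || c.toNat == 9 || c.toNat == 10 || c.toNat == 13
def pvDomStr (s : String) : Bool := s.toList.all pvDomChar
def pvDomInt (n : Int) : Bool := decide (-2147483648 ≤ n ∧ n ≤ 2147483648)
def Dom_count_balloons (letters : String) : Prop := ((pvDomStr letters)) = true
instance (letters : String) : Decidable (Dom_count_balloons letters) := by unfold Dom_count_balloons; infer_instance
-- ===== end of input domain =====

-- B replaces A's repeated-subtraction spelling loop with one tally pass and the
-- closed form min(b, a, l//2, o//2, n); same result, no speed claim.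

-- ===== PORT A =====

-- A's dict literal { "b":0, "a":0, "l":0, "o":0, "n":0 } with its five fixed keys.
structure BalloonLC where
  b : Int
  a : Int
  l : Int
  o : Int
  n : Int
deriving DecidableEq, Repr

-- 'for letter in letters: if letter in letter_count: letter_count[letter] += 1'
def balloonTally : List Char → BalloonLC → BalloonLC
  | [], s => s
  | c :: cs, s =>
    balloonTally cs
      (if c = 'b' then { s with b := s.b + 1 }
       else if c = 'a' then { s with a := s.a + 1 }
       else if c = 'l' then { s with l := s.l + 1 }
       else if c = 'o' then { s with o := s.o + 1 }
       else if c = 'n' then { s with n := s.n + 1 }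
       else s)

-- one pass of 'for char in "balloon"' (chars b,a,l,l,o,o,n in order), the
-- intermediate decrements inlined into the conditions ('l' is tested at l and
-- l-1, 'o' at o and o-1): none = the break fired (keep_spelling = False);
-- some = the counts after the full pass and the updated balloon_count.
def balloonSpellOnce (s : BalloonLC) (bc : Int) : Option (BalloonLC × Int) :=
  if s.b < 1 then none
  else if s.a < 1 then none
  else if s.l < 1 then none
  else if s.l - 1 < 1 then none
  else if s.o < 1 then none
  else if s.o - 1 < 1 then none
  else if s.n < 1 then none
  else some (⟨s.b - 1, s.a - 1, s.l - 2, s.o - 2, s.n - 1⟩, bc + 1)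

-- success/failure characterisation of one pass (cited by the loop's termination proof)
theorem balloonSpellOnce_eq (s : BalloonLC) (bc : Int) :
    balloonSpellOnce s bc =
      if 1 ≤ s.b ∧ 1 ≤ s.a ∧ 2 ≤ s.l ∧ 2 ≤ s.o ∧ 1 ≤ s.n then
        some (⟨s.b - 1, s.a - 1, s.l - 2, s.o - 2, s.n - 1⟩, bc + 1)
      else none := by
  unfold balloonSpellOnce
  by_cases hC : 1 ≤ s.b ∧ 1 ≤ s.a ∧ 2 ≤ s.l ∧ 2 ≤ s.o ∧ 1 ≤ s.n
  · obtain ⟨hb, ha, hl, ho, hn⟩ := hC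
    rw [if_pos (⟨hb, ha, hl, ho, hn⟩ : 1 ≤ s.b ∧ 1 ≤ s.a ∧ 2 ≤ s.l ∧ 2 ≤ s.o ∧ 1 ≤ s.n),
        if_neg (by omega : ¬ s.b < 1), if_neg (by omega : ¬ s.a < 1),
        if_neg (by omega : ¬ s.l < 1), if_neg (by omega : ¬ s.l - 1 < 1),
        if_neg (by omega : ¬ s.o < 1), if_neg (by omega : ¬ s.o - 1 < 1),
        if_neg (by omega : ¬ s.n < 1)]
  · rw [if_neg hC]
    split_ifs <;>
      first
        | rfl
        | exact absurd ⟨by omega, by omega, by omega, by omega, by omega⟩ hC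

-- termination of the while loop: a successful pass decrements the 'n' count (port helper)
theorem balloonSpellOnce_n {s : BalloonLC} {bc : Int} {s' : BalloonLC} {bc' : Int}
    (h : balloonSpellOnce s bc = some (s', bc')) : s'.n.toNat < s.n.toNat := by
  rw [balloonSpellOnce_eq] at h
  split_ifs at h with hC
  simp only [Option.some.injEq, Prod.mk.injEq] at h
  obtain ⟨hs, -⟩ := h
  subst hs
  show (s.n - 1).toNat < s.n.toNat
  omega

-- 'while keep_spelling: …'
def balloonSpellLoop (s : BalloonLC) (bc : Int) : Int :=
  match h : balloonSpellOnce s bc with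
  | none => bc
  | some (s', bc') => balloonSpellLoop s' bc'
termination_by s.n.toNat
decreasing_by exact balloonSpellOnce_n h

def count_balloons (letters : String) : Int :=
  let lc := balloonTally letters.toList ⟨0, 0, 0, 0, 0⟩
  balloonSpellLoop lc 0

-- ===== PORT B =====

def count_balloons_alt (letters : String) : Int :=
  let counts : PySem.Dict Char Int :=
    letters.toList.foldl (fun d ch => d.insert ch (d.getD ch 0 + 1)) PySem.Dict.empty
  min (min (min (min (counts.getD 'b' 0) (counts.getD 'a' 0))
        (PySem.Int.floordiv (counts.getD 'l' 0) 2))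
      (PySem.Int.floordiv (counts.getD 'o' 0) 2))
    (counts.getD 'n' 0)

-- ===== PRECONDITION & SPEC =====
def Spec_count_balloons (letters : String) (out : Int) : Prop := out = count_balloons_alt letters
instance (letters : String) (out : Int) : Decidable (Spec_count_balloons letters out) := by unfold Spec_count_balloons; infer_instance

-- ===== CLAIM (what is proved, stated in full; the proofs are below) =====
def Claim_equal_count_balloons : Prop := ∀ (letters : String), Dom_count_balloons letters → Spec_count_balloons letters (count_balloons letters)

-- ===== LEMMAS AND PROOFS =====

theorem balloonTally_eq (cs : List Char) (s : BalloonLC) :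
    balloonTally cs s =
      ⟨s.b + cs.count 'b', s.a + cs.count 'a', s.l + cs.count 'l',
       s.o + cs.count 'o', s.n + cs.count 'n'⟩ := by
  induction cs generalizing s with
  | nil => simp [balloonTally]
  | cons c cs ih =>
    simp only [balloonTally, ih, List.count_cons]
    split_ifs with h1 h2 h3 h4 h5 <;> simp_all [BalloonLC.mk.injEq] <;> omega

-- closed form of the state's value in B
def balloonMin (s : BalloonLC) : Int :=
  min (min (min (min s.b s.a) (s.l / 2)) (s.o / 2)) s.n

theorem balloonSpellLoop_eq (k : Nat) :
    ∀ (s : BalloonLC) (bc : Int), s.n.toNat ≤ k →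
      0 ≤ s.b → 0 ≤ s.a → 0 ≤ s.l → 0 ≤ s.o → 0 ≤ s.n →
      balloonSpellLoop s bc = bc + balloonMin s := by
  induction k with
  | zero =>
    intro s bc hk hb ha hl ho hn
    rw [balloonSpellLoop]
    split
    · unfold balloonMin; omega
    · next s' bc' h1 =>
      rw [balloonSpellOnce_eq, if_neg (by omega :
        ¬ (1 ≤ s.b ∧ 1 ≤ s.a ∧ 2 ≤ s.l ∧ 2 ≤ s.o ∧ 1 ≤ s.n))] at h1
      cases h1
  | succ k ih =>
    intro s bc hk hb ha hl ho hn
    rw [balloonSpellLoop]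
    split
    · next h1 =>
      rw [balloonSpellOnce_eq] at h1
      have hC : ¬ (1 ≤ s.b ∧ 1 ≤ s.a ∧ 2 ≤ s.l ∧ 2 ≤ s.o ∧ 1 ≤ s.n) := by
        by_contra hc
        rw [if_pos hc] at h1
        cases h1
      unfold balloonMin
      omega
    · next s' bc' h1 =>
      rw [balloonSpellOnce_eq] at h1
      have hC : 1 ≤ s.b ∧ 1 ≤ s.a ∧ 2 ≤ s.l ∧ 2 ≤ s.o ∧ 1 ≤ s.n := by
        by_contra hc
        rw [if_neg hc] at h1
        cases h1
      rw [if_pos hC] at h1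
      simp only [Option.some.injEq, Prod.mk.injEq] at h1
      obtain ⟨hs, hbc⟩ := h1
      subst hbc
      have hb' : s'.b = s.b - 1 := by rw [← hs]
      have ha' : s'.a = s.a - 1 := by rw [← hs]
      have hl' : s'.l = s.l - 2 := by rw [← hs]
      have ho' : s'.o = s.o - 2 := by rw [← hs]
      have hn' : s'.n = s.n - 1 := by rw [← hs]
      rw [ih s' (bc + 1) (by omega) (by omega) (by omega) (by omega) (by omega)
            (by omega)]
      unfold balloonMin
      omega

-- ===== VERDICT (by name: the statement is the Claim_ definition above) =====
theorem count_balloons_spec : Claim_equal_count_balloons := by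
  intro letters _
  unfold Spec_count_balloons count_balloons count_balloons_alt
  have ht : balloonTally letters.toList ⟨0, 0, 0, 0, 0⟩ =
      ⟨(letters.toList.count 'b' : Int), (letters.toList.count 'a' : Int),
       (letters.toList.count 'l' : Int), (letters.toList.count 'o' : Int),
       (letters.toList.count 'n' : Int)⟩ := by
    rw [balloonTally_eq]; simp
  rw [ht, balloonSpellLoop_eq (letters.toList.count 'n') _ _ (by simp)
        (by simp) (by simp) (by simp) (by simp) (by simp)]
  unfold balloonMin
  simp only [PySem.Dict.getD_foldl_insert_add_one, PySem.Dict.getD_empty,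
    PySem.Int.floordiv_eq_ediv_of_pos (by norm_num : (0:Int) < 2)]
  simp only [zero_add]
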